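-- pv_equiv track=rewrite | github.com/ozkayas/leetcode_solutions | 9999-A2Z-OA/Count Unique String After Reversing.py | countUniqueStringAfterReversing
-- ===== SOURCE A (Python) =====
-- from collections import Counter
--
-- def countUniqueStringAfterReversing(s:str)->int:
--     N = len(s)
--     count_c = Counter(s)
--
--     N = len(s)
--     possibleAffectingSubs = N*(N-1) // 2
--     count_c = Counter(s)
--     for curr_count in count_c.values():
--         if curr_count > 1:
--             possibleAffectingSubs -= curr_count*(curr_count-1) // 2  # remove all duplicated count
--     return possibleAffectingSubs + 1
-- ===== SOURCE B (Python) =====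
-- def countUniqueStringAfterReversing(s: str) -> int:
--     # One left-to-right pass: count position pairs i<j with s[i] != s[j], plus 1.
--     seen = {}
--     total = 0
--     for j, ch in enumerate(s):
--         total += j - seen.get(ch, 0)
--         seen[ch] = seen.get(ch, 0) + 1
--     return total + 1
-- ===== Notes on version B (the rewrite author's own statement) =====
-- stated objective: alternative
-- what changed: Replaces the closed-form N*(N-1)//2 seed minus a loop over final Counter frequencies by a single online pass that accumulates, per position j, the number of earlier positions holding a different character (j minus the running count of s[j]).
import Mathlib
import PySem

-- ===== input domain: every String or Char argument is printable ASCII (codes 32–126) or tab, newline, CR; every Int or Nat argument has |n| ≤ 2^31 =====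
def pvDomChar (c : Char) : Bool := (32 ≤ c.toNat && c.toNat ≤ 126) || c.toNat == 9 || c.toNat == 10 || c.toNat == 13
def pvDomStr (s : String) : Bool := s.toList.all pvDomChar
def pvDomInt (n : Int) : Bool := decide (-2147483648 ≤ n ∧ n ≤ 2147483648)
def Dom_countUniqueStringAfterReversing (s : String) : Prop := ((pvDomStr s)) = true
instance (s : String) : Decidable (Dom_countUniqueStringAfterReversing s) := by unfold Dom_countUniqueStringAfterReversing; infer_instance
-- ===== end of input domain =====

-- B replaces A's closed-form seed minus a pass over final Counter frequencies by one
-- online pass accumulating, per position j, j minus the running count of s[j] (objective: alternative).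

-- ===== PORT A =====
def countUniqueStringAfterReversing (s : String) : Int :=
  let N : Int := PySem.Str.len s
  let possibleAffectingSubs : Int := PySem.Int.floordiv (N * (N - 1)) 2
  let count_c := PySem.Dict.counter s.toList
  let res := count_c.values.foldl
    (fun acc curr_count =>
      if curr_count > 1 then acc - PySem.Int.floordiv (curr_count * (curr_count - 1)) 2 else acc)
    possibleAffectingSubs
  res + 1

-- ===== PORT B =====
def pvStepB (st : PySem.Dict Char Int × Int) (p : Int × Char) : PySem.Dict Char Int × Int :=
  (st.1.insert p.2 (st.1.getD p.2 0 + 1), st.2 + (p.1 - st.1.getD p.2 0))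

def countUniqueStringAfterReversing_alt (s : String) : Int :=
  let r := (PySem.List.enumerate s.toList 0).foldl pvStepB (PySem.Dict.empty, 0)
  r.2 + 1

-- ===== PRECONDITION & SPEC =====
def Spec_countUniqueStringAfterReversing (s : String) (out : Int) : Prop := out = countUniqueStringAfterReversing_alt s
instance (s : String) (out : Int) : Decidable (Spec_countUniqueStringAfterReversing s out) := by unfold Spec_countUniqueStringAfterReversing; infer_instance

-- ===== CLAIM (what is proved, stated in full; the proofs are below) =====
def Claim_equal_countUniqueStringAfterReversing : Prop := ∀ (s : String), Dom_countUniqueStringAfterReversing s → Spec_countUniqueStringAfterReversing s (countUniqueStringAfterReversing s)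

-- ===== LEMMAS AND PROOFS =====

def pvC2 (n : Int) : Int := PySem.Int.floordiv (n * (n - 1)) 2

def pvSvals (l : List Char) : Int :=
  ((PySem.Set.ofList l).map (fun k => pvC2 ((l.count k : Nat) : Int))).sum

theorem pvC2_succ (n : Int) : pvC2 (n + 1) = pvC2 n + n := by
  unfold pvC2
  rw [PySem.Int.floordiv_eq_ediv_of_pos (by omega), PySem.Int.floordiv_eq_ediv_of_pos (by omega)]
  have h : (n + 1) * (n + 1 - 1) = n * (n - 1) + n * 2 := by ring
  rw [h, Int.add_mul_ediv_right _ _ (by omega)]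

theorem pvC2_one : pvC2 1 = 0 := by decide

-- A's fold subtracts the sum of the guarded terms
theorem pvFoldA (vs : List Int) (a : Int) :
    vs.foldl (fun acc c => if c > 1 then acc - PySem.Int.floordiv (c * (c - 1)) 2 else acc) a
      = a - (vs.map (fun c => if c > 1 then pvC2 c else 0)).sum := by
  induction vs generalizing a with
  | nil => simp
  | cons c vs ih =>
    simp only [List.foldl_cons, List.map_cons, List.sum_cons, ih]
    unfold pvC2
    split_ifs <;> ring

-- guard is vacuous on nonnegative counts
theorem pvGuard (c : Nat) :
    (if ((c : Int) > 1) then pvC2 (c : Int) else 0) = pvC2 (c : Int) := by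
  by_cases h : ((c : Int) > 1)
  · simp [h]
  · have hc : c = 0 ∨ c = 1 := by omega
    rcases hc with h0 | h1 <;> subst_vars <;> decide

-- first component of B's fold is the insert-counter loop
theorem pvFstFold (l : List Char) (j : Int) (d : PySem.Dict Char Int) (t : Int) :
    ((PySem.List.enumerate l j).foldl pvStepB (d, t)).1
      = l.foldl (fun d ch => d.insert ch (d.getD ch 0 + 1)) d := by
  induction l generalizing j d t with
  | nil => simp [PySem.List.enumerate_nil]
  | cons x l ih => simp [PySem.List.enumerate_cons, pvStepB, ih]

theorem pvSvals_append (l : List Char) (x : Char) :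
    pvSvals (l ++ [x]) = pvSvals l + (l.count x : Int) := by
  have hcount : ∀ k : Char, k ≠ x → (l ++ [x]).count k = l.count k := by
    intro k hk
    simp [List.count_append, Ne.symm hk]
  have hcx : (l ++ [x]).count x = l.count x + 1 := by
    simp [List.count_append]
  unfold pvSvals
  rw [PySem.Set.ofList_append_singleton]
  by_cases hx : x ∈ l
  · have hxS : x ∈ PySem.Set.ofList l := (PySem.Set.mem_ofList l x).mpr hx
    rw [PySem.Set.add_of_mem hxS]
    have hnd : (PySem.Set.ofList l).Nodup := PySem.Set.nodup_ofList l
    have hp : (PySem.Set.ofList l).Perm (x :: (PySem.Set.ofList l).erase x) :=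
      List.perm_cons_erase hxS
    have herase : ∀ k ∈ (PySem.Set.ofList l).erase x,
        pvC2 (((l ++ [x]).count k : Nat) : Int) = pvC2 ((l.count k : Nat) : Int) := by
      intro k hk
      have hkx : k ≠ x := ((List.Nodup.mem_erase_iff hnd).mp hk).1
      rw [hcount k hkx]
    rw [(hp.map _).sum_eq, (hp.map _).sum_eq]
    simp only [List.map_cons, List.sum_cons]
    rw [List.map_congr_left herase, hcx]
    have : ((l.count x + 1 : Nat) : Int) = ((l.count x : Nat) : Int) + 1 := by push_cast; ring
    rw [this, pvC2_succ]
    ring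
  · have hxS : x ∉ PySem.Set.ofList l := fun h => hx ((PySem.Set.mem_ofList l x).mp h)
    rw [PySem.Set.add_of_not_mem hxS]
    have hS : ∀ k ∈ PySem.Set.ofList l,
        pvC2 (((l ++ [x]).count k : Nat) : Int) = pvC2 ((l.count k : Nat) : Int) := by
      intro k hk
      have hkx : k ≠ x := fun h => hxS (h ▸ hk)
      rw [hcount k hkx]
    have hc0 : l.count x = 0 := List.count_eq_zero.mpr hx
    rw [List.map_append, List.sum_append, List.map_congr_left hS]
    simp [hc0, pvC2_one]

-- core invariant: B's running total is pairs-with-distinct-chars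
theorem pvCore (l : List Char) :
    ((PySem.List.enumerate l 0).foldl pvStepB (PySem.Dict.empty, 0)).2
      = pvC2 (l.length : Int) - pvSvals l := by
  induction l using List.reverseRecOn with
  | nil => simp [PySem.List.enumerate_nil, pvSvals, pvC2, PySem.Int.floordiv]
  | append_singleton l x ih =>
    rw [PySem.List.enumerate_append, List.foldl_append]
    simp only [PySem.List.enumerate_cons, PySem.List.enumerate_nil, List.foldl_cons,
      List.foldl_nil]
    have hsnd : ∀ (st : PySem.Dict Char Int × Int) (p : Int × Char),
        (pvStepB st p).2 = st.2 + (p.1 - st.1.getD p.2 0) := fun _ _ => rfl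
    rw [hsnd, ih, pvFstFold, PySem.Dict.getD_foldl_insert_add_one, PySem.Dict.getD_empty,
      pvSvals_append, List.length_append]
    have hlen : (((l.length + [x].length : Nat)) : Int) = (l.length : Int) + 1 := by
      simp
    rw [hlen, pvC2_succ]
    ring

-- ===== VERDICT (by name: the statement is the Claim_ definition above) =====
theorem countUniqueStringAfterReversing_spec : Claim_equal_countUniqueStringAfterReversing := by
  intro s _
  unfold Spec_countUniqueStringAfterReversing countUniqueStringAfterReversing countUniqueStringAfterReversing_alt
  simp only [PySem.Str.len_eq]
  rw [pvCore, pvFoldA]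
  have hv : (PySem.Dict.counter s.toList).values
      = (PySem.Set.ofList s.toList).map (fun k => ((s.toList.count k : Nat) : Int)) := by
    show ((PySem.Dict.counter s.toList).items.map (·.2)) = _
    rw [PySem.Dict.items_counter, List.map_map]
    rfl
  rw [hv, List.map_map]
  have hg : ∀ k ∈ PySem.Set.ofList s.toList,
      ((fun c => if c > 1 then pvC2 c else 0) ∘ fun k => ((s.toList.count k : Nat) : Int)) k
        = pvC2 ((s.toList.count k : Nat) : Int) := by
    intro k _
    exact pvGuard (s.toList.count k)
  rw [List.map_congr_left hg]
  unfold pvSvals pvC2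
  ring
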